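-- pv_equiv track=rewrite | github.com/thereisonlyonebigboss-source/Flashcards | flashcard_generator.py | _fallback_chunking
-- ===== SOURCE A (Python) =====
-- from typing import List, Dict, Optional
--
-- def _fallback_chunking(text: str, max_chars: int) -> List[str]:
--     """
--     Fallback chunking method that splits on paragraphs or lines.
--
--     Args:
--         text: Text to chunk
--         max_chars: Maximum characters per chunk
--
--     Returns:
--         List of text chunks
--     """
--     chunks = []
--     current_lines = []
--     current_len = 0
--
--     for line in text.splitlines():
--         line = line.rstrip()
--         if not line:
--             # Add empty lines as paragraph breaks
--             if current_lines:
--                 chunks.append("\n".join(current_lines))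
--                 current_lines = []
--                 current_len = 0
--             continue
--
--         line_len = len(line) + 1  # +1 for newline
--
--         if current_len + line_len > max_chars and current_lines:
--             chunks.append("\n".join(current_lines))
--             current_lines = [line]
--             current_len = line_len
--         else:
--             current_lines.append(line)
--             current_len += line_len
--
--     if current_lines:
--         chunks.append("\n".join(current_lines))
--
--     return chunks
-- ===== SOURCE B (Python) =====
-- def _fallback_chunking(text: str, max_chars: int):
--     # Phase 1: group rstripped lines into paragraphs (maximal runs of non-empty lines).
--     paragraphs = []
--     para = []
--     for raw in text.splitlines():
--         line = raw.rstrip()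
--         if line:
--             para.append(line)
--         elif para:
--             paragraphs.append(para)
--             para = []
--     if para:
--         paragraphs.append(para)
--
--     # Phase 2: greedily pack each paragraph's lines into chunks under max_chars.
--     chunks = []
--     for para in paragraphs:
--         cur = []
--         cur_len = 0
--         for line in para:
--             ln = len(line) + 1  # +1 for newline
--             if cur and cur_len + ln > max_chars:
--                 chunks.append("\n".join(cur))
--                 cur = [line]
--                 cur_len = ln
--             else:
--                 cur.append(line)
--                 cur_len += ln
--         chunks.append("\n".join(cur))
--     return chunks
-- ===== Notes on version B (the rewrite author's own statement) =====
-- stated objective: alternative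
-- what changed: Replaces A's single interleaved streaming loop (one mutable chunk/length state across the whole text) with two phases: first group rstripped lines into paragraphs (maximal runs of non-empty lines), then greedily pack each paragraph's lines into chunks independently.
import Mathlib
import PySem

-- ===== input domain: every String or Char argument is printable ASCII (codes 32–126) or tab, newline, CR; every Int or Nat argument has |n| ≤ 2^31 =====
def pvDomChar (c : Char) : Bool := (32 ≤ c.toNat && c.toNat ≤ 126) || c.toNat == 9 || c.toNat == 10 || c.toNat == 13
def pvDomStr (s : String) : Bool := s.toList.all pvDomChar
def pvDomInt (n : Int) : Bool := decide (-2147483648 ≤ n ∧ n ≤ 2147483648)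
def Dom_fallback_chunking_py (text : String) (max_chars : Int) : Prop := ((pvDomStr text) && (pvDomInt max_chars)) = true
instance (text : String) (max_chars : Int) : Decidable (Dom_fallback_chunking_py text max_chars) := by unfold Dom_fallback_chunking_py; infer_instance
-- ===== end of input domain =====

-- B re-decomposes A's single streaming loop into a paragraph-grouping pass followed by a
-- per-paragraph greedy packing pass (objective: alternative decomposition, same cost).

-- ===== PORT A =====
-- literal port of A's single loop: state = (chunks, current_lines, current_len)
def fallbackGoA (mc : Int) (chunks cur : List String) (curLen : Int) :
    List String → List String
  | [] => if cur.isEmpty then chunks else chunks ++ [PySem.Str.join "\n" cur]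
  | raw :: ls =>
    let line := PySem.Str.rstrip raw
    if line = "" then
      if cur.isEmpty then fallbackGoA mc chunks cur curLen ls
      else fallbackGoA mc (chunks ++ [PySem.Str.join "\n" cur]) [] 0 ls
    else
      let ll : Int := (PySem.Str.len line : Int) + 1
      if curLen + ll > mc && !cur.isEmpty then
        fallbackGoA mc (chunks ++ [PySem.Str.join "\n" cur]) [line] ll ls
      else fallbackGoA mc chunks (cur ++ [line]) (curLen + ll) ls

def fallback_chunking_py (text : String) (max_chars : Int) : List String :=
  fallbackGoA max_chars [] [] 0 (PySem.Str.splitlines text)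

-- ===== PORT B =====
-- phase 1: group rstripped lines into paragraphs (maximal runs of non-empty lines)
def fallbackPhase1 (para : List String) : List String → List (List String)
  | [] => if para.isEmpty then [] else [para]
  | raw :: ls =>
    let line := PySem.Str.rstrip raw
    if line ≠ "" then fallbackPhase1 (para ++ [line]) ls
    else if para.isEmpty then fallbackPhase1 [] ls
    else para :: fallbackPhase1 [] ls

-- phase 2: greedy packer of one paragraph's lines
def fallbackPackGo (mc : Int) (cur : List String) (curLen : Int) :
    List String → List String
  | [] => [PySem.Str.join "\n" cur]
  | l :: ls =>
    let ln : Int := (PySem.Str.len l : Int) + 1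
    if !cur.isEmpty && curLen + ln > mc then
      PySem.Str.join "\n" cur :: fallbackPackGo mc [l] ln ls
    else fallbackPackGo mc (cur ++ [l]) (curLen + ln) ls

def fallback_chunking_py_alt (text : String) (max_chars : Int) : List String :=
  (fallbackPhase1 [] (PySem.Str.splitlines text)).flatMap
    (fun p => fallbackPackGo max_chars [] 0 p)

-- ===== PRECONDITION & SPEC =====
def Spec_fallback_chunking_py (text : String) (max_chars : Int) (out : List String) : Prop := out = fallback_chunking_py_alt text max_chars
instance (text : String) (max_chars : Int) (out : List String) : Decidable (Spec_fallback_chunking_py text max_chars out) := by unfold Spec_fallback_chunking_py; infer_instance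

-- ===== CLAIM (what is proved, stated in full; the proofs are below) =====
def Claim_equal_fallback_chunking_py : Prop := ∀ (text : String) (max_chars : Int), Dom_fallback_chunking_py text max_chars → Spec_fallback_chunking_py text max_chars (fallback_chunking_py text max_chars)

-- ===== LEMMAS AND PROOFS =====

-- A's loop with the emitted-chunks accumulator factored out
def fallbackPG (mc : Int) (cur : List String) (curLen : Int) :
    List String → List String
  | [] => if cur.isEmpty then [] else [PySem.Str.join "\n" cur]
  | raw :: ls =>
    let line := PySem.Str.rstrip raw
    if line = "" then
      if cur.isEmpty then fallbackPG mc cur curLen ls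
      else PySem.Str.join "\n" cur :: fallbackPG mc [] 0 ls
    else
      let ll : Int := (PySem.Str.len line : Int) + 1
      if curLen + ll > mc && !cur.isEmpty then
        PySem.Str.join "\n" cur :: fallbackPG mc [line] ll ls
      else fallbackPG mc (cur ++ [line]) (curLen + ll) ls

theorem fallbackGoA_factor (mc : Int) (ls : List String) :
    ∀ (chunks cur : List String) (curLen : Int),
    fallbackGoA mc chunks cur curLen ls = chunks ++ fallbackPG mc cur curLen ls := by
  induction ls with
  | nil =>
    intro chunks cur curLen
    simp only [fallbackGoA, fallbackPG]
    split <;> simp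
  | cons raw ls ih =>
    intro chunks cur curLen
    simp only [fallbackGoA, fallbackPG]
    split
    · split
      · exact ih ..
      · rw [ih]; simp
    · split
      · rw [ih]; simp
      · exact ih ..

theorem fallback_main (mc : Int) (ls : List String) :
    ∀ (para cur E : List String) (curLen : Int),
    (∀ rest, fallbackPackGo mc [] 0 (para ++ rest) = E ++ fallbackPackGo mc cur curLen rest) →
    (para = [] → cur = [] ∧ curLen = 0 ∧ E = []) →
    (para ≠ [] → cur ≠ []) →
    (fallbackPhase1 para ls).flatMap (fun p => fallbackPackGo mc [] 0 p)
      = E ++ fallbackPG mc cur curLen ls := by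
  induction ls with
  | nil =>
    intro para cur E curLen h hnil hne
    by_cases hp : para = []
    · obtain ⟨hc, _, hE⟩ := hnil hp
      subst hp hc hE
      simp [fallbackPhase1, fallbackPG]
    · have hc := hne hp
      have h0 := h []
      simp only [List.append_nil] at h0
      simp [fallbackPhase1, fallbackPG, hp, hc, h0, fallbackPackGo]
  | cons raw ls ih =>
    intro para cur E curLen h hnil hne
    simp only [fallbackPhase1, fallbackPG]
    by_cases hline : PySem.Str.rstrip raw = ""
    · simp only [hline, ne_eq, not_true_eq_false, if_false]
      by_cases hp : para = []
      · obtain ⟨hc, hl, hE⟩ := hnil hp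
        subst hp hc hl hE
        simp only [List.isEmpty_nil, if_true]
        exact ih [] [] [] 0 (fun rest => rfl) (fun _ => ⟨rfl, rfl, rfl⟩) (fun hh => absurd rfl hh)
      · have hc := hne hp
        have h0 := h []
        simp only [List.append_nil] at h0
        have hp' : para.isEmpty = false := by simp [hp]
        have hc' : cur.isEmpty = false := by simp [hc]
        simp only [hp', hc', Bool.false_eq_true, if_false]
        rw [List.flatMap_cons,
          ih [] [] [] 0 (fun rest => rfl) (fun _ => ⟨rfl, rfl, rfl⟩) (fun hh => absurd rfl hh)]
        simp [h0, fallbackPackGo]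
    · simp only [hline, ne_eq, not_false_eq_true, if_true, if_false]
      set line := PySem.Str.rstrip raw with hl
      set ll : Int := (PySem.Str.len line : Int) + 1 with hll
      by_cases hg : (curLen + ll > mc ∧ cur ≠ [])
      · obtain ⟨hgt, hc⟩ := hg
        have hguard : (decide (curLen + ll > mc) && !cur.isEmpty) = true := by
          simp [hgt, hc]
        rw [hguard, if_pos rfl]
        rw [show E ++ PySem.Str.join "\n" cur :: fallbackPG mc [line] ll ls
              = E ++ [PySem.Str.join "\n" cur] ++ fallbackPG mc [line] ll ls by simp]
        refine ih (para ++ [line]) [line] (E ++ [PySem.Str.join "\n" cur]) ll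
          (fun rest => ?_) (by simp) (fun _ => by simp)
        rw [List.append_assoc, List.singleton_append, h (line :: rest)]
        simp only [fallbackPackGo]
        have hguard2 : (!cur.isEmpty && decide (curLen + ll > mc)) = true := by
          simp [hgt, hc]
        rw [hguard2, if_pos rfl]
        simp [hll]
      · have hguard : (decide (curLen + ll > mc) && !cur.isEmpty) = false := by
          rcases not_and_or.mp hg with hgt | hc
          · simp [show ¬ curLen + ll > mc from hgt]
          · simp at hc; simp [hc]
        rw [hguard, if_neg (by simp)]
        refine ih (para ++ [line]) (cur ++ [line]) E (curLen + ll)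
          (fun rest => ?_) (by simp) (fun _ => by simp)
        rw [List.append_assoc, List.singleton_append, h (line :: rest)]
        simp only [fallbackPackGo]
        have hguard2 : (!cur.isEmpty && decide (curLen + ll > mc)) = false := by
          rcases not_and_or.mp hg with hgt | hc
          · simp [show ¬ curLen + ll > mc from hgt]
          · simp at hc; simp [hc]
        rw [hguard2, if_neg (by simp)]

-- ===== VERDICT (by name: the statement is the Claim_ definition above) =====
theorem fallback_chunking_py_spec : Claim_equal_fallback_chunking_py := by
  intro text mc _
  unfold Spec_fallback_chunking_py fallback_chunking_py fallback_chunking_py_alt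
  rw [fallbackGoA_factor, List.nil_append,
    fallback_main mc (PySem.Str.splitlines text) [] [] [] 0
      (fun rest => rfl) (fun _ => ⟨rfl, rfl, rfl⟩) (fun hh => absurd rfl hh),
    List.nil_append]
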